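-- pv_equiv track=rewrite | github.com/a37ai/cloudscript | CLI/cloud_cli.py | _parse_ansible_stats
-- ===== SOURCE A (Python) =====
-- def _parse_ansible_stats(line: str) -> dict:
--     """Parse Ansible stats line"""
--     stats = {
--         'changed': 0,
--         'failed': 0,
--         'unreachable': 0
--     }
--
--     parts = line.split(':')[1].split()
--     for part in parts:
--         if '=' in part:
--             key, value = part.split('=')
--             if key in stats:
--                 stats[key] = int(value)
--
--     return stats
-- ===== SOURCE B (Python) =====
-- def _lookup(key, rparts):
--     for p in rparts:
--         if '=' in p and p.split('=')[0] == key: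
--             return int(p.split('=')[1])
--     return 0
--
--
-- def _parse_ansible_stats(line: str) -> dict:
--     """Parse Ansible stats line"""
--     rparts = line.split(':')[1].split()[::-1]
--     return {key: _lookup(key, rparts) for key in ('changed', 'failed', 'unreachable')}
-- ===== Notes on version B (the rewrite author's own statement) =====
-- stated objective: alternative
-- what changed: B replaces A's single forward pass that mutates a pre-filled stats dict with a per-key backward search: for each of the three fixed keys it scans the reversed token list and returns on the first (i.e. last) matching assignment, assembling the result as a dict comprehension; correct because A's forward overwriting keeps exactly the last assignment per key.
import Mathlib
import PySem

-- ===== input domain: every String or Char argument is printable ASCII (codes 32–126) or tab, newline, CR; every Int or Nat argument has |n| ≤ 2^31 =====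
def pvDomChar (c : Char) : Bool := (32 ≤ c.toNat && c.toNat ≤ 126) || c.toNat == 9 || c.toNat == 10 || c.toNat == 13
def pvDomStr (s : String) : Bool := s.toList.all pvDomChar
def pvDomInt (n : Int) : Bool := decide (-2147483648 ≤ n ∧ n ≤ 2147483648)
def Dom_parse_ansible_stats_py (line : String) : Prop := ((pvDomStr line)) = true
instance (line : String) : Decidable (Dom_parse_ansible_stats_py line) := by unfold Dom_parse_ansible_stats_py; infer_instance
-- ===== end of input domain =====

-- B searches backwards per fixed key for the last assignment instead of a forward pass mutating
-- a stats dict (alternative decomposition; same cost).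

-- ===== PORT A =====
def parse_ansible_stats_py (line : String) : List (String × Int) :=
  let stats : PySem.Dict String Int :=
    PySem.Dict.ofList [("changed", 0), ("failed", 0), ("unreachable", 0)]
  let parts := PySem.Str.split₀ (PySem.List.pyGetD ((PySem.Str.split? line ":").getD []) 1 "")
  let stats := parts.foldl (fun stats part =>
    if PySem.Str.isIn "=" part then
      let pieces := (PySem.Str.split? part "=").getD []
      let key := PySem.List.pyGetD pieces 0 ""
      let value := PySem.List.pyGetD pieces 1 ""
      if stats.contains key then
        stats.insert key ((PySem.Int.ofStr? value).getD 0)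
      else stats
    else stats) stats
  stats.items

-- ===== PORT B =====
-- helper _lookup: first match in the reversed token list, or 0
def pvLookup (key : String) : List String → Int
  | [] => 0
  | p :: rest =>
      if PySem.Str.isIn "=" p
          && (PySem.List.pyGetD ((PySem.Str.split? p "=").getD []) 0 "" == key) then
        (PySem.Int.ofStr? (PySem.List.pyGetD ((PySem.Str.split? p "=").getD []) 1 "")).getD 0
      else pvLookup key rest

def parse_ansible_stats_py_alt (line : String) : List (String × Int) :=
  let rparts := (PySem.Str.split₀ (PySem.List.pyGetD ((PySem.Str.split? line ":").getD []) 1 "")).reverse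
  ((["changed", "failed", "unreachable"] : List String).foldl
    (fun d key => d.insert key (pvLookup key rparts))
    (PySem.Dict.empty : PySem.Dict String Int)).items

-- ===== PRECONDITION & SPEC =====
-- Pre_ excludes exactly the inputs on which A raises: a line without ':' (IndexError on [1]),
-- a token containing two or more '=' (unpacking ValueError), and a stat token whose value is
-- not a valid int literal (ValueError from int()).
def Pre_parse_ansible_stats_py (line : String) : Prop :=
  1 < ((PySem.Str.split? line ":").getD []).length ∧
  ∀ p ∈ PySem.Str.split₀ (PySem.List.pyGetD ((PySem.Str.split? line ":").getD []) 1 ""),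
    PySem.Str.isIn "=" p = true →
      ((PySem.Str.split? p "=").getD []).length = 2 ∧
      (PySem.List.pyGetD ((PySem.Str.split? p "=").getD []) 0 "" ∈ (["changed", "failed", "unreachable"] : List String) →
        (PySem.Int.ofStr? (PySem.List.pyGetD ((PySem.Str.split? p "=").getD []) 1 "")).isSome = true)
instance (line : String) : Decidable (Pre_parse_ansible_stats_py line) := by
  unfold Pre_parse_ansible_stats_py; infer_instance

def pvWitness_parse_ansible_stats_py : String := "ok: changed=2 failed=0 unreachable=1"

def Spec_parse_ansible_stats_py (line : String) (out : List (String × Int)) : Prop := out = parse_ansible_stats_py_alt line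
instance (line : String) (out : List (String × Int)) : Decidable (Spec_parse_ansible_stats_py line out) := by unfold Spec_parse_ansible_stats_py; infer_instance

-- ===== CLAIM (what is proved, stated in full; the proofs are below) =====
def Claim_equal_parse_ansible_stats_py : Prop := ∀ (line : String), Dom_parse_ansible_stats_py line → Pre_parse_ansible_stats_py line → Spec_parse_ansible_stats_py line (parse_ansible_stats_py line)

-- ===== LEMMAS AND PROOFS =====

-- proof-side abbreviations for the token projections
def pvElig (p : String) : Bool := PySem.Str.isIn "=" p
def pvKey (p : String) : String := PySem.List.pyGetD ((PySem.Str.split? p "=").getD []) 0 ""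
def pvVal (p : String) : String := PySem.List.pyGetD ((PySem.Str.split? p "=").getD []) 1 ""
def pvConv (v : String) : Int := (PySem.Int.ofStr? v).getD 0

-- inserting one of the three literal keys into a three-key stats dict
theorem pvInsC (a b c v : Int) :
    (PySem.Dict.mk [("changed", a), ("failed", b), ("unreachable", c)]).insert "changed" v = PySem.Dict.mk [("changed", v), ("failed", b), ("unreachable", c)] := by
  simp [PySem.Dict.insert, PySem.Dict.contains]
theorem pvInsF (a b c v : Int) :
    (PySem.Dict.mk [("changed", a), ("failed", b), ("unreachable", c)]).insert "failed" v = PySem.Dict.mk [("changed", a), ("failed", v), ("unreachable", c)] := by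
  simp [PySem.Dict.insert, PySem.Dict.contains]
theorem pvInsU (a b c v : Int) :
    (PySem.Dict.mk [("changed", a), ("failed", b), ("unreachable", c)]).insert "unreachable" v = PySem.Dict.mk [("changed", a), ("failed", b), ("unreachable", v)] := by
  simp [PySem.Dict.insert, PySem.Dict.contains]

-- one iteration of A's loop on a three-key stats dict
theorem pvA_step (p : String) (a b c : Int) :
    (if PySem.Str.isIn "=" p then
       if (PySem.Dict.mk [("changed", a), ("failed", b), ("unreachable", c)]).contains (PySem.List.pyGetD ((PySem.Str.split? p "=").getD []) 0 "") then
         (PySem.Dict.mk [("changed", a), ("failed", b), ("unreachable", c)]).insert (PySem.List.pyGetD ((PySem.Str.split? p "=").getD []) 0 "") ((PySem.Int.ofStr? (PySem.List.pyGetD ((PySem.Str.split? p "=").getD []) 1 "")).getD 0)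
       else PySem.Dict.mk [("changed", a), ("failed", b), ("unreachable", c)]
     else PySem.Dict.mk [("changed", a), ("failed", b), ("unreachable", c)])
    = PySem.Dict.mk
        [("changed", if pvElig p && (pvKey p == "changed") then pvConv (pvVal p) else a),
         ("failed", if pvElig p && (pvKey p == "failed") then pvConv (pvVal p) else b),
         ("unreachable", if pvElig p && (pvKey p == "unreachable") then pvConv (pvVal p) else c)] := by
  have ek : (PySem.List.pyGetD ((PySem.Str.split? p "=").getD []) 0 "") = pvKey p := rfl
  have ev : ((PySem.Int.ofStr? (PySem.List.pyGetD ((PySem.Str.split? p "=").getD []) 1 "")).getD 0) = pvConv (pvVal p) := rfl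
  have ee : PySem.Str.isIn "=" p = pvElig p := rfl
  rw [ek, ev, ee]
  by_cases he : pvElig p = true
  · by_cases h1 : pvKey p = "changed"
    · rw [h1]; simp [he, PySem.Dict.contains, pvInsC]
    · by_cases h2 : pvKey p = "failed"
      · rw [h2]; simp [he, PySem.Dict.contains, pvInsF]
      · by_cases h3 : pvKey p = "unreachable"
        · rw [h3]; simp [he, PySem.Dict.contains, pvInsU]
        · have hc : (PySem.Dict.mk [("changed", a), ("failed", b), ("unreachable", c)]).contains (pvKey p) = false := by
            simp [PySem.Dict.contains, Ne.symm h1, Ne.symm h2, Ne.symm h3]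
          simp [he, hc, h1, h2, h3]
  · simp [he]

-- A's loop keeps the three-key shape, each value the running value of the last matching token
theorem pvA_char (parts : List String) : ∀ (a b c : Int),
    parts.foldl (fun stats part =>
      if PySem.Str.isIn "=" part then
        if stats.contains (PySem.List.pyGetD ((PySem.Str.split? part "=").getD []) 0 "") then
          stats.insert (PySem.List.pyGetD ((PySem.Str.split? part "=").getD []) 0 "")
            ((PySem.Int.ofStr? (PySem.List.pyGetD ((PySem.Str.split? part "=").getD []) 1 "")).getD 0)
        else stats
      else stats)
      (PySem.Dict.mk [("changed", a), ("failed", b), ("unreachable", c)])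
    = PySem.Dict.mk
        [("changed", parts.foldl (fun cur p => if pvElig p && (pvKey p == "changed") then pvConv (pvVal p) else cur) a),
         ("failed", parts.foldl (fun cur p => if pvElig p && (pvKey p == "failed") then pvConv (pvVal p) else cur) b),
         ("unreachable", parts.foldl (fun cur p => if pvElig p && (pvKey p == "unreachable") then pvConv (pvVal p) else cur) c)] := by
  induction parts with
  | nil => intro a b c; rfl
  | cons p rest ih =>
    intro a b c
    simp only [List.foldl_cons]
    rw [pvA_step]
    exact ih _ _ _

-- pvLookup is first-match-wins over its list
theorem pvLookup_eq_find (k : String) (l : List String) :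
    pvLookup k l
    = match l.find? (fun p => pvElig p && (pvKey p == k)) with
      | some p => pvConv (pvVal p)
      | none => 0 := by
  induction l with
  | nil => rfl
  | cons p rest ih =>
    by_cases h : (pvElig p && (pvKey p == k)) = true
    · have h' : (PySem.Str.isIn "=" p
          && (PySem.List.pyGetD ((PySem.Str.split? p "=").getD []) 0 "" == k)) = true := h
      simp only [pvLookup]
      rw [if_pos h']
      simp [List.find?, h, pvConv, pvVal]
    · have h' : ¬ ((PySem.Str.isIn "=" p
          && (PySem.List.pyGetD ((PySem.Str.split? p "=").getD []) 0 "" == k)) = true) := h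
      simp only [pvLookup, List.find?]
      rw [if_neg h']
      simp only [Bool.not_eq_true] at h
      rw [h]
      exact ih

-- the forward overwriting fold computes the last match, i.e. the first match of the reverse
theorem pvFold_eq_find (k : String) (l : List String) : ∀ (a : Int),
    l.foldl (fun cur p => if pvElig p && (pvKey p == k) then pvConv (pvVal p) else cur) a
    = match l.reverse.find? (fun p => pvElig p && (pvKey p == k)) with
      | some p => pvConv (pvVal p)
      | none => a := by
  induction l with
  | nil => intro a; rfl
  | cons p rest ih =>
    intro a
    simp only [List.foldl_cons, List.reverse_cons, List.find?_append]
    rw [ih]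
    cases hf : rest.reverse.find? (fun p => pvElig p && (pvKey p == k)) with
    | some q => simp
    | none =>
      simp only [List.find?]
      by_cases h : (pvElig p && (pvKey p == k)) = true
      · simp [h]
      · simp only [Bool.not_eq_true] at h
        simp [h]

theorem pvFold_eq_lookup (k : String) (l : List String) :
    l.foldl (fun cur p => if pvElig p && (pvKey p == k) then pvConv (pvVal p) else cur) 0
    = pvLookup k l.reverse := by
  rw [pvFold_eq_find, pvLookup_eq_find]

-- ===== VERDICT (by name: the statement is the Claim_ definition above) =====
theorem parse_ansible_stats_py_spec : Claim_equal_parse_ansible_stats_py := by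
  intro line _ _
  unfold Spec_parse_ansible_stats_py parse_ansible_stats_py parse_ansible_stats_py_alt
  simp only []
  rw [show (PySem.Dict.ofList [("changed", 0), ("failed", 0), ("unreachable", 0)] : PySem.Dict String Int)
        = PySem.Dict.mk [("changed", 0), ("failed", 0), ("unreachable", 0)] from rfl]
  rw [pvA_char]
  set parts := PySem.Str.split₀ (PySem.List.pyGetD ((PySem.Str.split? line ":").getD []) 1 "") with hp
  rw [pvFold_eq_lookup, pvFold_eq_lookup, pvFold_eq_lookup]
  simp [List.foldl_cons, PySem.Dict.insert, PySem.Dict.contains, PySem.Dict.empty]
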